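-- pv_equiv track=rewrite | github.com/nicklasorte/spectrum-systems | spectrum_systems/modules/governance/proof_bundle_size_budget.py | _detect_duplicate_refs
-- ===== SOURCE A (Python) =====
-- from typing import Any, Dict, List, Mapping, Optional
--
-- _REF_KEY_SUFFIX = "_ref"
--
-- def _collect_top_level_refs(bundle: Mapping[str, Any]) -> List[str]:
--     """Return the names of top-level keys that look like evidence references.
--
--     A reference key ends in ``_ref`` and has a string (or ``None``) value.
--     """
--     refs: List[str] = []
--     for key, value in bundle.items():
--         if not isinstance(key, str):
--             continue
--         if key.endswith(_REF_KEY_SUFFIX) and (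
--             value is None or isinstance(value, str)
--         ):
--             refs.append(key)
--     return refs
--
-- def _detect_duplicate_refs(bundle: Mapping[str, Any]) -> List[str]:
--     """Return ref-key names whose VALUES collide across more than one key.
--
--     We treat ``None``/empty as not-a-reference so "all four are None" does
--     not register as duplicates.
--     """
--     seen: Dict[str, List[str]] = {}
--     for key in _collect_top_level_refs(bundle):
--         value = bundle[key]
--         if not isinstance(value, str) or not value.strip():
--             continue
--         seen.setdefault(value, []).append(key)
--     duplicates: List[str] = []
--     for value, keys in seen.items():
--         if len(keys) > 1:
--             duplicates.extend(sorted(keys))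
--     return sorted(set(duplicates))
-- ===== SOURCE B (Python) =====
-- from typing import Any, List, Mapping
--
-- _REF_KEY_SUFFIX = "_ref"
--
-- def _detect_duplicate_refs(bundle: Mapping[str, Any]) -> List[str]:
--     """Pairwise comparison, no grouping dict: a qualifying ref key is a
--     duplicate exactly when some OTHER qualifying ref key holds the same
--     value (keys of a mapping are unique, so each key appears once)."""
--     pairs = [
--         (key, value)
--         for key, value in bundle.items()
--         if isinstance(key, str)
--         and key.endswith(_REF_KEY_SUFFIX)
--         and isinstance(value, str)
--         and value.strip()
--     ]
--     return sorted(
--         key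
--         for key, value in pairs
--         if any(other != key and v == value for other, v in pairs)
--     )
-- ===== Notes on version B (the rewrite author's own statement) =====
-- stated objective: alternative
-- what changed: A groups keys by value into a dict of lists and extracts the groups of size > 1; B uses no grouping structure at all: it collects the qualifying (key, value) pairs once and keeps a key exactly when a pairwise scan finds some OTHER key holding the same value (quadratic pairwise comparison instead of dict grouping).
import Mathlib
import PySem

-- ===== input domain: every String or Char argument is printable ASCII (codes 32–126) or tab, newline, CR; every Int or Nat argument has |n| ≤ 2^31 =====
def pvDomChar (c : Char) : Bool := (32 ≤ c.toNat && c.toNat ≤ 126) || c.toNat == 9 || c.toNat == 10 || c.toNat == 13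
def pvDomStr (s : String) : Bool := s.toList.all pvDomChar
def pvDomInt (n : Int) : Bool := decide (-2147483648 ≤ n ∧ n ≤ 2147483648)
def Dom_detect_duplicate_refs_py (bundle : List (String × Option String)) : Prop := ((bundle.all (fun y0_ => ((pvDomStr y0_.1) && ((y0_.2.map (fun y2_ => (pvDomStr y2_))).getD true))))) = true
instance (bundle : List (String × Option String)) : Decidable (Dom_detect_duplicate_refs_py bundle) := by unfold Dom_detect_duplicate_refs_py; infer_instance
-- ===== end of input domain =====

-- B drops A's group-by-value dict of key-lists entirely: it collects the qualifying
-- (key, value) pairs once and keeps the keys for which a pairwise scan finds another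
-- key with the same value (alternative algorithm, quadratic instead of dict grouping).

-- ===== PORT A =====
-- the bundle dict: duplicate keys in the association list collapse as in Python's dict
def detect_duplicate_refs_py (bundle : List (String × Option String)) : List String :=
  let d := PySem.Dict.ofList bundle
  -- _collect_top_level_refs: at this type every value is None or a str, so only the suffix test filters
  let refs : List String := d.items.foldl (fun refs kv =>
      if PySem.Str.endswith kv.1 "_ref" then refs ++ [kv.1] else refs) []
  let seen : PySem.Dict String (List String) := refs.foldl (fun seen key =>
      match PySem.Dict.get? d key with
      | some (some value) =>
          if PySem.Str.strip value == "" then seen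
          else PySem.Dict.modify seen value [] (· ++ [key])
      | _ => seen) PySem.Dict.empty
  let duplicates : List String := seen.items.foldl (fun dup vk =>
      if vk.2.length > 1 then dup ++ PySem.List.sorted vk.2 (fun x => x) false else dup) []
  PySem.List.sorted (PySem.Set.ofList duplicates) (fun x => x) false

-- ===== PORT B =====
def detect_duplicate_refs_py_alt (bundle : List (String × Option String)) : List String :=
  let d := PySem.Dict.ofList bundle
  let pairs : List (String × String) :=
    (d.items.filter (fun kv => match kv.2 with
        | some v => PySem.Str.endswith kv.1 "_ref" && !(PySem.Str.strip v == "")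
        | none => false)).map (fun kv => (kv.1, kv.2.getD ""))
  PySem.List.sorted
    ((pairs.filter (fun p => pairs.any (fun q => !(q.1 == p.1) && (q.2 == p.2)))).map (fun p => p.1))
    (fun x => x) false

-- ===== PRECONDITION & SPEC =====
def Spec_detect_duplicate_refs_py (bundle : List (String × Option String)) (out : List String) : Prop := out = detect_duplicate_refs_py_alt bundle
instance (bundle : List (String × Option String)) (out : List String) : Decidable (Spec_detect_duplicate_refs_py bundle out) := by unfold Spec_detect_duplicate_refs_py; infer_instance

-- ===== CLAIM (what is proved, stated in full; the proofs are below) =====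
def Claim_equal_detect_duplicate_refs_py : Prop := ∀ (bundle : List (String × Option String)), Dom_detect_duplicate_refs_py bundle → Spec_detect_duplicate_refs_py bundle (detect_duplicate_refs_py bundle)

-- ===== LEMMAS AND PROOFS =====

set_option maxHeartbeats 1000000

-- the qualifying test on a (key, value) pair: _ref key with a non-blank string value
def pvQual (p : String × Option String) : Bool :=
  match p.2 with
  | some v => PySem.Str.endswith p.1 "_ref" && !(PySem.Str.strip v == "")
  | none => false

-- A's grouping loop over the ref KEYS, each looked up in d, is the standard grouping fold over (value, key) pairs
lemma loopA_eq (d : PySem.Dict String (Option String)) (l : List (String × Option String))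
    (H : ∀ p ∈ l, PySem.Dict.get? d p.1 = some p.2)
    (HE : ∀ p ∈ l, PySem.Str.endswith p.1 "_ref" = true)
    (s : PySem.Dict String (List String)) :
    (l.map (fun kv => kv.1)).foldl (fun seen key =>
      match PySem.Dict.get? d key with
      | some (some value) =>
          if PySem.Str.strip value == "" then seen
          else PySem.Dict.modify seen value [] (· ++ [key])
      | _ => seen) s
    = ((l.filter pvQual).map (fun p => (p.2.getD "", p.1))).foldl
        (fun dd p => PySem.Dict.modify dd p.1 [] (· ++ [p.2])) s := by
  induction l generalizing s with
  | nil => rfl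
  | cons p t ih =>
    obtain ⟨k, v2⟩ := p
    have hk : PySem.Dict.get? d k = some v2 := H _ (List.mem_cons_self ..)
    have he : PySem.Str.endswith k "_ref" = true := HE _ (List.mem_cons_self ..)
    have H' : ∀ q ∈ t, PySem.Dict.get? d q.1 = some q.2 := fun q hq => H q (List.mem_cons_of_mem _ hq)
    have HE' : ∀ q ∈ t, PySem.Str.endswith q.1 "_ref" = true := fun q hq => HE q (List.mem_cons_of_mem _ hq)
    cases v2 with
    | none =>
      simp only [List.map_cons, List.foldl_cons, hk, List.filter_cons, pvQual]
      simp only [Bool.false_eq_true, if_false]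
      exact ih H' HE' _
    | some v =>
      cases hs : (PySem.Str.strip v == "") with
      | true =>
        simp only [List.map_cons, List.foldl_cons, hk, if_pos hs]
        rw [List.filter_cons_of_neg (by simp [pvQual, hs])]
        exact ih H' HE' _
      | false =>
        simp only [List.map_cons, List.foldl_cons, hk]
        rw [if_neg (by simp [hs]),
          List.filter_cons_of_pos (by simp [pvQual, hs]; simpa using he),
          List.map_cons, List.foldl_cons]
        exact ih H' HE' _

-- filtering by the suffix test and then by pvQual is filtering by pvQual (pvQual implies the suffix test)
lemma filter_reconcile (l : List (String × Option String)) :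
    (l.filter (fun kv => PySem.Str.endswith kv.1 "_ref")).filter pvQual = l.filter pvQual := by
  rw [List.filter_filter]
  apply List.filter_congr
  rintro ⟨k, v2⟩ _
  cases v2 with
  | none => simp [pvQual]
  | some v =>
    simp only [pvQual]
    cases h : PySem.Str.endswith k "_ref" <;> simp

-- in a list of pairs with pairwise-distinct keys, "some OTHER key holds the same value"
-- is the same as "the value occurs at least twice"
lemma exists_other_iff_count (l : List (String × String))
    (hnd : (l.map Prod.fst).Nodup) (p : String × String) (hp : p ∈ l) :
    (∃ q ∈ l, q.1 ≠ p.1 ∧ q.2 = p.2) ↔ 1 < l.countP (fun r => r.2 == p.2) := by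
  have hl : l.Nodup := hnd.of_map
  have hsub : ((l.filter (fun r => r.2 == p.2)).map Prod.fst).Nodup :=
    ((List.filter_sublist).map Prod.fst).nodup hnd
  rw [List.countP_eq_length_filter]
  constructor
  · rintro ⟨q, hq, hq1, hq2⟩
    have hpf : p ∈ l.filter (fun r => r.2 == p.2) := List.mem_filter.2 ⟨hp, by simp⟩
    have hqf : q ∈ l.filter (fun r => r.2 == p.2) := List.mem_filter.2 ⟨hq, by simp [hq2]⟩
    have hne : q ≠ p := fun h => hq1 (by rw [h])
    rcases hf : l.filter (fun r => r.2 == p.2) with _ | ⟨a, _ | ⟨b, t⟩⟩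
    · rw [hf] at hpf; simp at hpf
    · rw [hf] at hpf hqf
      simp only [List.mem_singleton] at hpf hqf
      exact absurd (hqf.trans hpf.symm) hne
    · simp [hf]
  · intro hlen
    rcases hf : l.filter (fun r => r.2 == p.2) with _ | ⟨a, _ | ⟨b, t⟩⟩
    · rw [hf] at hlen; simp at hlen
    · rw [hf] at hlen; simp at hlen
    · have ha : a ∈ l ∧ (a.2 == p.2) = true := List.mem_filter.1 (hf ▸ List.mem_cons_self ..)
      have hb : b ∈ l ∧ (b.2 == p.2) = true :=
        List.mem_filter.1 (hf ▸ List.mem_cons_of_mem _ (List.mem_cons_self ..))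
      have hab : a.1 ≠ b.1 := by
        rw [hf] at hsub
        simp only [List.map_cons, List.nodup_cons, List.mem_cons] at hsub
        exact fun h => hsub.1 (Or.inl h)
      by_cases hap : a.1 = p.1
      · exact ⟨b, hb.1, fun h => hab (hap.trans h.symm), by simpa using hb.2⟩
      · exact ⟨a, ha.1, hap, by simpa using ha.2⟩

lemma ports_eq (bundle : List (String × Option String)) :
    detect_duplicate_refs_py bundle = detect_duplicate_refs_py_alt bundle := by
  simp only [detect_duplicate_refs_py, detect_duplicate_refs_py_alt]
  have hnd : (PySem.Dict.ofList bundle).keys.Nodup := PySem.Dict.nodup_keys_ofList bundle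
  have H : ∀ p ∈ (PySem.Dict.ofList bundle).items,
      PySem.Dict.get? (PySem.Dict.ofList bundle) p.1 = some p.2 := by
    rintro ⟨k, v⟩ hp; exact PySem.Dict.get?_of_mem_items _ hp hnd
  -- B's inline qualifying test is pvQual
  have hq : (fun (kv : String × Option String) => match kv.2 with
      | some v => PySem.Str.endswith kv.1 "_ref" && !(PySem.Str.strip v == "")
      | none => false) = pvQual := rfl
  rw [hq]
  -- A: refs loop
  rw [PySem.List.foldl_append_if (fun kv : String × Option String => PySem.Str.endswith kv.1 "_ref")
      (fun kv => kv.1)]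
  rw [List.nil_append]
  -- A: grouping loop
  rw [loopA_eq (PySem.Dict.ofList bundle) _
      (fun q hq => H q (List.mem_of_mem_filter hq))
      (fun q hq => by simpa using (List.mem_filter.1 hq).2) PySem.Dict.empty]
  rw [filter_reconcile]
  -- names
  set qual := (PySem.Dict.ofList bundle).items.filter pvQual with hqual
  set S := qual.map (fun p => (p.2.getD "", p.1)) with hS
  set pairs := qual.map (fun p => (p.1, p.2.getD "")) with hpairs
  set seen := S.foldl (fun dd p => PySem.Dict.modify dd p.1 [] (· ++ [p.2])) PySem.Dict.empty with hseen
  have hndq : (qual.map Prod.fst).Nodup := by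
    have hsub : List.Sublist (qual.map Prod.fst)
        ((PySem.Dict.ofList bundle).items.map Prod.fst) :=
      (List.filter_sublist).map Prod.fst
    exact hsub.nodup hnd
  have hndp : (pairs.map Prod.fst).Nodup := by
    rw [hpairs, List.map_map]
    simpa [Function.comp] using hndq
  have hndseen : seen.keys.Nodup :=
    PySem.Dict.nodup_keys_foldl_modify_key S (fun p => p.1) []
      (fun _ p => (· ++ [p.2])) PySem.Dict.empty PySem.Dict.nodup_keys_empty
  have hkeys : seen.keys = PySem.Set.ofList (S.map (fun p => p.1)) := by
    rw [hseen, PySem.Dict.keys_foldl_modify_key S (fun p => p.1) [] (fun _ p => (· ++ [p.2])),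
      PySem.Dict.keys_empty, PySem.Set.update_nil_left]
  have hgetD : ∀ v, seen.getD v [] = (S.filter (fun p => p.1 == v)).map (fun p => p.2) := by
    intro v
    rw [hseen, PySem.Dict.getD_foldl_modify_append, PySem.Dict.getD_empty, List.nil_append]
  rw [PySem.Dict.items_eq_map_keys seen hndseen []]
  -- duplicates loop: extend-with-if is flatMap
  rw [PySem.List.foldl_congr_mem _ _
      (fun dup vk => dup ++ (if vk.2.length > 1 then PySem.List.sorted vk.2 (fun x => x) false else []))
      _ (by intro acc x _; by_cases hx : x.2.length > 1 <;> simp [hx])]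
  rw [PySem.List.foldl_append_eq_flatMap, List.nil_append]
  -- counts over qual vs counts over pairs
  have hcntpairs : ∀ v : String,
      pairs.countP (fun r => r.2 == v) = qual.countP (fun p => p.2.getD "" == v) := by
    intro v; rw [hpairs, List.countP_map]; rfl
  -- B output list has no duplicates
  have hndB : ((pairs.filter (fun p => pairs.any (fun q => !(q.1 == p.1) && (q.2 == p.2)))).map
      (fun p => p.1)).Nodup := by
    have hsub : List.Sublist
        ((pairs.filter (fun p => pairs.any (fun q => !(q.1 == p.1) && (q.2 == p.2)))).map
          (fun p => p.1)) (pairs.map (fun p => p.1)) := (List.filter_sublist).map _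
    exact hsub.nodup hndp
  -- membership equivalence and conclusion
  apply PySem.List.sorted_eq_sorted_of_perm _ _ _ (fun a b h => h)
  rw [List.perm_ext_iff_of_nodup (PySem.Set.nodup_ofList _) hndB]
  intro k
  rw [PySem.Set.mem_ofList]
  constructor
  · intro hk
    rw [List.mem_flatMap] at hk
    obtain ⟨vk, hvk, hkin⟩ := hk
    rw [List.mem_map] at hvk
    obtain ⟨v, hv, rfl⟩ := hvk
    by_cases hlen : (seen.getD v []).length > 1
    · rw [if_pos hlen, PySem.List.mem_sorted] at hkin
      rw [hgetD] at hkin hlen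
      rw [List.mem_map] at hkin
      obtain ⟨p, hpf, rfl⟩ := hkin
      rw [List.mem_filter] at hpf
      obtain ⟨hpq, hpv⟩ := hpf
      rw [hS, List.mem_map] at hpq
      obtain ⟨r, hr, rfl⟩ := hpq
      have hvq : r.2.getD "" = v := by simpa using hpv
      have hcq : 1 < qual.countP (fun p => p.2.getD "" == r.2.getD "") := by
        rw [hS] at hlen
        simp only [List.length_map] at hlen
        rw [List.countP_eq_length_filter, hvq]
        have : (S.filter (fun p => p.1 == v)).length
            = (qual.filter (fun p => p.2.getD "" == v)).length := by
          rw [hS, List.filter_map, List.length_map]; rfl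
        rw [hS] at this
        omega
      have hrp : (r.1, r.2.getD "") ∈ pairs := by
        rw [hpairs, List.mem_map]; exact ⟨r, hr, rfl⟩
      rw [List.mem_map]
      refine ⟨(r.1, r.2.getD ""), List.mem_filter.2 ⟨hrp, ?_⟩, rfl⟩
      rw [List.any_eq_true]
      obtain ⟨q, hqm, hq1, hq2⟩ :=
        (exists_other_iff_count pairs hndp (r.1, r.2.getD "") hrp).2
          (by rw [hcntpairs]; exact hcq)
      exact ⟨q, hqm, by simp [hq1, hq2]⟩
    · rw [if_neg hlen] at hkin
      simp at hkin
  · intro hk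
    rw [List.mem_map] at hk
    obtain ⟨p, hpf, rfl⟩ := hk
    rw [List.mem_filter] at hpf
    obtain ⟨hpm, hpany⟩ := hpf
    have hcnt : 1 < pairs.countP (fun r => r.2 == p.2) := by
      rw [← exists_other_iff_count pairs hndp p hpm]
      rw [List.any_eq_true] at hpany
      obtain ⟨q, hqm, hqc⟩ := hpany
      simp only [Bool.and_eq_true, Bool.not_eq_eq_eq_not, Bool.not_true, beq_eq_false_iff_ne,
        ne_eq, beq_iff_eq] at hqc
      exact ⟨q, hqm, hqc.1, hqc.2⟩
    rw [hcntpairs] at hcnt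
    obtain ⟨r, hr, hre⟩ : ∃ r ∈ qual, p = (r.1, r.2.getD "") := by
      rw [hpairs, List.mem_map] at hpm
      obtain ⟨r, hr, hre⟩ := hpm
      exact ⟨r, hr, hre.symm⟩
    have hcq : 1 < qual.countP (fun q => q.2.getD "" == r.2.getD "") := by
      have : p.2 = r.2.getD "" := by rw [hre]
      rwa [this] at hcnt
    rw [List.mem_flatMap]
    refine ⟨(r.2.getD "", seen.getD (r.2.getD "") []), ?_, ?_⟩
    · rw [List.mem_map]
      refine ⟨r.2.getD "", ?_, rfl⟩
      rw [hkeys, PySem.Set.mem_ofList, hS, List.map_map]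
      exact List.mem_map.2 ⟨r, hr, rfl⟩
    · have hlen : (seen.getD (r.2.getD "") []).length > 1 := by
        rw [hgetD, hS]
        simpa [List.length_map, List.filter_map, List.countP_eq_length_filter,
          Function.comp] using hcq
      rw [if_pos hlen, PySem.List.mem_sorted, hgetD, hS, List.filter_map, List.map_map]
      have : p.1 = r.1 := by rw [hre]
      rw [this]
      exact List.mem_map.2 ⟨r, List.mem_filter.2 ⟨hr, by simp⟩, rfl⟩

-- ===== VERDICT (by name: the statement is the Claim_ definition above) =====
theorem detect_duplicate_refs_py_spec : Claim_equal_detect_duplicate_refs_py := by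
  intro bundle _
  unfold Spec_detect_duplicate_refs_py
  exact ports_eq bundle
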